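-- pv_equiv track=rewrite | github.com/ww-rm/gmalg | gmalg/core.py | _generate_lucas
-- ===== SOURCE A (Python) =====
-- from typing import Callable, Tuple, Type
--
-- def _inv(x: int, p: int):
--     r1 = p
--     r2 = x
--     t1 = 0
--     t2 = 1
--     while r2 > 0:
--         q, r = divmod(r1, r2)
--         r1 = r2
--         r2 = r
--         t = t1 - q * t2
--         t1 = t2
--         t2 = t
--     return t1 % p
--
-- def _generate_lucas(X: int, Y: int, k: int, p: int) -> Tuple[int, int]:
--     """Lucas Sequence, k begin at 0.
--
--     Uk = X * Uk-1 - Y * Uk-2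
--     Vk = X * Vk-1 - Y * Vk-2
--
--     (0, 2) -> (1, X) -> ...
--     """
--
--     delta = (X * X - 4 * Y) % p
--     inv2 = _inv(2, p)
--
--     U, V = 0, 2
--     for i in f"{k:b}":
--         U, V = (U * V) % p, ((V * V + delta * U * U) * inv2) % p
--         if i == "1":
--             U, V = ((X * U + V) * inv2) % p, ((X * V + delta * U) * inv2) % p
--
--     return U, V
-- ===== SOURCE B (Python) =====
-- def _generate_lucas(X: int, Y: int, k: int, p: int):
--     """Lucas sequence (U_n, V_n) mod p, n = |k|, via 2x2 companion-matrix
--     exponentiation by squaring: [[X,-Y],[1,0]]^n = [[U_{n+1},-Y*U_n],[U_n,*]],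
--     then V_n = 2*U_{n+1} - X*U_n.  No discriminant, no inverse of 2."""
--     n = abs(k)
--
--     def mul(A, B):
--         (a, b), (c, d) = A
--         (e, f), (g, h) = B
--         return (((a * e + b * g) % p, (a * f + b * h) % p),
--                 ((c * e + d * g) % p, (c * f + d * h) % p))
--
--     def mpow(m):
--         if m == 0:
--             return ((1 % p, 0), (0, 1 % p))
--         S = mpow(m // 2)
--         S = mul(S, S)
--         if m % 2:
--             S = mul(S, ((X % p, -Y % p), (1 % p, 0)))
--         return S
--
--     Mn = mpow(n)
--     u, u1 = Mn[1][0], Mn[0][0]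
--     return u % p, (2 * u1 - X * u) % p
-- ===== Notes on version B (the rewrite author's own statement) =====
-- stated objective: alternative
-- what changed: Replaces A's bit-string double-and-add ladder on the (U,V) pair (which needs the discriminant delta and an extended-Euclid modular inverse of 2) by exponentiation-by-squaring of the 2x2 companion matrix [[X,-Y],[1,0]] mod p, reading U_n off the matrix and recovering V_n = 2*U_{n+1} - X*U_n; no discriminant and no modular inverse at all.
-- outside the precondition, e.g. on _generate_lucas(1, 1, 3, 4): A returns (0, 0), B returns (0, 2)
import Mathlib
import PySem

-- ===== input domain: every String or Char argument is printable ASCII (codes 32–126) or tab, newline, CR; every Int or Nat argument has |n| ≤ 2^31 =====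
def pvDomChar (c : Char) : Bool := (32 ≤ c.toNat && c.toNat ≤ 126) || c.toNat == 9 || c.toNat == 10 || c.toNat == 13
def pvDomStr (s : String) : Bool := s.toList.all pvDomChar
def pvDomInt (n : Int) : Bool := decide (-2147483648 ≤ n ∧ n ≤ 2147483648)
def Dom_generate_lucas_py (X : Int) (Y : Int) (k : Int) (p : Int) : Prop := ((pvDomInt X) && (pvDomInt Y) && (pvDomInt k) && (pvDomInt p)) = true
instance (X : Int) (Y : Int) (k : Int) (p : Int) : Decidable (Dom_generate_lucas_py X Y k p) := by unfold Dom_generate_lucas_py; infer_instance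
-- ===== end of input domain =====

-- B replaces A's bit-string double-and-add Lucas ladder (discriminant + extended-Euclid modular
-- inverse of 2) with squaring of the 2x2 companion matrix mod p: no discriminant, no inverse.


-- ===== PORT A =====
-- the 'while r2 > 0' loop of _inv (extended Euclid)
def invLoop (r1 r2 t1 t2 : Int) : Int :=
  if h : 0 < r2 then
    let q := PySem.Int.floordiv r1 r2
    let r := PySem.Int.mod r1 r2
    invLoop r2 r t2 (t1 - q * t2)
  else t1
termination_by r2.toNat
decreasing_by
  have h1 := PySem.Int.mod_nonneg r1 h
  have h2 := PySem.Int.mod_lt r1 h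
  omega

def inv_py (x p : Int) : Int := PySem.Int.mod (invLoop p x 0 1) p

-- the body of the 'for i in f"{k:b}"' loop
def lucasStep (X delta inv2 p : Int) (s : Int × Int) (c : Char) : Int × Int :=
  let U := PySem.Int.mod (s.1 * s.2) p
  let V := PySem.Int.mod ((s.2 * s.2 + delta * s.1 * s.1) * inv2) p
  if c = '1' then
    (PySem.Int.mod ((X * U + V) * inv2) p, PySem.Int.mod ((X * V + delta * U) * inv2) p)
  else (U, V)

def generate_lucas_py (X : Int) (Y : Int) (k : Int) (p : Int) : Int × Int :=
  let delta := PySem.Int.mod (X * X - 4 * Y) p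
  let inv2 := inv_py 2 p
  (PySem.Int.toBinChars k).foldl (lucasStep X delta inv2 p) (0, 2)

-- ===== PORT B =====
-- mul(A, B): 2x2 matrix product with entries reduced mod p
def matMul (p : Int) (A B : (Int × Int) × (Int × Int)) : (Int × Int) × (Int × Int) :=
  ((PySem.Int.mod (A.1.1 * B.1.1 + A.1.2 * B.2.1) p, PySem.Int.mod (A.1.1 * B.1.2 + A.1.2 * B.2.2) p),
   (PySem.Int.mod (A.2.1 * B.1.1 + A.2.2 * B.2.1) p, PySem.Int.mod (A.2.1 * B.1.2 + A.2.2 * B.2.2) p))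

-- mpow(m): binary exponentiation of the companion matrix [[X,-Y],[1,0]] mod p
def matPow (X Y p : Int) (m : Nat) : (Int × Int) × (Int × Int) :=
  if m = 0 then ((PySem.Int.mod 1 p, 0), (0, PySem.Int.mod 1 p))
  else
    let S := matPow X Y p (m / 2)
    let S2 := matMul p S S
    if m % 2 = 1 then
      matMul p S2 ((PySem.Int.mod X p, PySem.Int.mod (-Y) p), (PySem.Int.mod 1 p, 0))
    else S2
termination_by m
decreasing_by omega

def generate_lucas_py_alt (X : Int) (Y : Int) (k : Int) (p : Int) : Int × Int :=
  let n := k.natAbs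
  let Mn := matPow X Y p n
  (PySem.Int.mod Mn.2.1 p, PySem.Int.mod (2 * Mn.1.1 - X * Mn.2.1) p)

-- ===== PRECONDITION & SPEC =====
-- Pre_ restricts to the function's natural domain of odd moduli (the library only calls it with an
-- odd prime p): for even nonzero p the "inverse of 2" that A's halving ladder multiplies by does
-- not exist, and at p = 0 A raises ZeroDivisionError.
def Pre_generate_lucas_py (X : Int) (Y : Int) (k : Int) (p : Int) : Prop := ¬ (2:Int) ∣ p
instance (X : Int) (Y : Int) (k : Int) (p : Int) : Decidable (Pre_generate_lucas_py X Y k p) := by unfold Pre_generate_lucas_py; infer_instance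

def pvWitness_generate_lucas_py : Int × Int × Int × Int := (3, 2, 5, 9)

def Spec_generate_lucas_py (X : Int) (Y : Int) (k : Int) (p : Int) (out : Int × Int) : Prop := out = generate_lucas_py_alt X Y k p
instance (X : Int) (Y : Int) (k : Int) (p : Int) (out : Int × Int) : Decidable (Spec_generate_lucas_py X Y k p out) := by unfold Spec_generate_lucas_py; infer_instance

-- ===== CLAIM (what is proved, stated in full; the proofs are below) =====
def Claim_equal_generate_lucas_py : Prop := ∀ (X : Int) (Y : Int) (k : Int) (p : Int), Dom_generate_lucas_py X Y k p → Pre_generate_lucas_py X Y k p → Spec_generate_lucas_py X Y k p (generate_lucas_py X Y k p)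

-- ===== LEMMAS AND PROOFS =====

-- the true Lucas pair (U_n, V_n) over ℤ
def uv (X Y : Int) : Nat → Int × Int
  | 0 => (0, 2)
  | 1 => (1, X)
  | n + 2 => (X * (uv X Y (n + 1)).1 - Y * (uv X Y n).1,
              X * (uv X Y (n + 1)).2 - Y * (uv X Y n).2)

def luU (X Y : Int) (n : Nat) : Int := (uv X Y n).1
def luV (X Y : Int) (n : Nat) : Int := (uv X Y n).2

lemma luU_zero (X Y : Int) : luU X Y 0 = 0 := rfl
lemma luU_one (X Y : Int) : luU X Y 1 = 1 := rfl
lemma luV_zero (X Y : Int) : luV X Y 0 = 2 := rfl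
lemma luV_one (X Y : Int) : luV X Y 1 = X := rfl
lemma luU_rec (X Y : Int) (n : Nat) : luU X Y (n+2) = X * luU X Y (n+1) - Y * luU X Y n := rfl
lemma luV_rec (X Y : Int) (n : Nat) : luV X Y (n+2) = X * luV X Y (n+1) - Y * luV X Y n := rfl

-- 2·U_{n+1} = X·U_n + V_n and 2·V_{n+1} = X·V_n + (X²-4Y)·U_n over ℤ
lemma L12 (X Y : Int) : ∀ n, 2 * luU X Y (n+1) = X * luU X Y n + luV X Y n ∧
    2 * luV X Y (n+1) = X * luV X Y n + (X*X - 4*Y) * luU X Y n := by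
  intro n
  induction n using Nat.twoStepInduction with
  | zero => rw [luU_zero, luU_one, luV_zero, luV_one]; constructor <;> ring
  | one =>
    rw [show (1:Nat)+1 = 0+2 from rfl, luU_rec, luV_rec, luU_zero, luU_one, luV_zero, luV_one]
    constructor <;> ring
  | more n ih1 ih2 =>
    obtain ⟨a1, a2⟩ := ih1
    obtain ⟨b1, b2⟩ := ih2
    rw [show n+1+1 = n+2 from rfl] at b1 b2
    rw [show n+2+1 = (n+1)+2 from rfl, luU_rec X Y (n+1), luV_rec X Y (n+1),
        luU_rec X Y n, luV_rec X Y n]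
    constructor
    · linear_combination X * b1 - Y * a1 - 2 * X * (luU_rec X Y n)
    · linear_combination X * b2 - Y * a2 - 2 * X * (luV_rec X Y n)

-- Lucas addition formulas over ℤ
lemma Ladd (X Y : Int) : ∀ n m, 2 * luU X Y (m+n) = luU X Y m * luV X Y n + luU X Y n * luV X Y m ∧
    2 * luV X Y (m+n) = luV X Y m * luV X Y n + (X*X-4*Y) * (luU X Y m * luU X Y n) := by
  intro n
  induction n using Nat.twoStepInduction with
  | zero =>
    intro m
    rw [Nat.add_zero, luU_zero, luV_zero]
    constructor <;> ring
  | one =>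
    intro m
    rw [luU_one, luV_one]
    constructor
    · linear_combination (L12 X Y m).1
    · linear_combination (L12 X Y m).2
  | more n ih1 ih2 =>
    intro m
    have c1 := (ih2 m).1
    have c2 := (ih2 m).2
    have d1 := (ih1 m).1
    have d2 := (ih1 m).2
    rw [show m+(n+1) = (m+n)+1 from rfl] at c1 c2
    rw [show n+1+1 = n+2 from rfl]
    rw [show m+(n+2) = (m+n)+2 from rfl, luU_rec X Y (m+n), luV_rec X Y (m+n),
        luU_rec X Y n, luV_rec X Y n]
    constructor
    · linear_combination X * c1 - Y * d1
    · linear_combination X * c2 - Y * d2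

lemma dvd_sub_mod (x p : Int) : p ∣ x - PySem.Int.mod x p := by
  have h := PySem.Int.floordiv_mul_add_mod x p
  exact ⟨PySem.Int.floordiv x p, by linarith⟩

-- Python's % is constant on residue classes (any nonzero modulus, either sign)
lemma mod_congr {p a b : Int} (hp : p ≠ 0) (h : p ∣ a - b) :
    PySem.Int.mod a p = PySem.Int.mod b p := by
  have hd : p ∣ PySem.Int.mod a p - PySem.Int.mod b p := by
    have h1 := dvd_sub_mod a p
    have h2 := dvd_sub_mod b p
    have e : PySem.Int.mod a p - PySem.Int.mod b p
        = (a - b) - (a - PySem.Int.mod a p) + (b - PySem.Int.mod b p) := by ring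
    rw [e]
    exact dvd_add (dvd_sub h h1) h2
  rcases lt_or_gt_of_ne hp with hneg | hpos
  · have b1 := PySem.Int.mod_neg_bounds a hneg
    have b2 := PySem.Int.mod_neg_bounds b hneg
    have := Int.eq_zero_of_abs_lt_dvd ((Int.neg_dvd).mpr hd)
      (by rw [abs_lt]; constructor <;> omega)
    omega
  · have b1 := PySem.Int.mod_nonneg a hpos
    have b2 := PySem.Int.mod_lt a hpos
    have b3 := PySem.Int.mod_nonneg b hpos
    have b4 := PySem.Int.mod_lt b hpos
    have := Int.eq_zero_of_abs_lt_dvd hd (by rw [abs_lt]; constructor <;> omega)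
    omega

-- 2 is cancellable modulo an odd p
lemma odd_cancel {p c : Int} (hp : ¬ (2:Int) ∣ p) (h : p ∣ 2 * c) : p ∣ c := by
  have hg : Int.gcd p 2 = 1 := by
    have hd : (Int.gcd p 2 : Int) ∣ 2 := Int.gcd_dvd_right p 2
    have hdp : (Int.gcd p 2 : Int) ∣ p := Int.gcd_dvd_left p 2
    have hle : Int.gcd p 2 ≤ 2 := by
      have : (Int.gcd p 2 : Int) ≤ 2 := Int.le_of_dvd (by norm_num) hd
      exact_mod_cast this
    have hne : Int.gcd p 2 ≠ 2 := by
      intro hh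
      exact hp (by rw [hh] at hdp; exact_mod_cast hdp)
    have hzero : Int.gcd p 2 ≠ 0 := by
      intro hh
      rw [hh] at hd
      norm_num at hd
    omega
  have hc : IsCoprime p 2 := Int.isCoprime_iff_gcd_eq_one.mpr hg
  exact hc.dvd_of_dvd_mul_left h

lemma ne_zero_of_not_two_dvd {p : Int} (hp2 : ¬ (2:Int) ∣ p) : p ≠ 0 := by
  intro h
  exact hp2 (h ▸ dvd_zero 2)

-- one ladder step: double (and add one if the bit is '1'), mod an odd p
lemma lucas_step_spec (X Y delta inv2 p : Int) (m : Nat) (s1 s2 : Int) (c : Char)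
    (hp2 : ¬(2:Int) ∣ p)
    (hdelta : p ∣ delta - (X*X - 4*Y)) (hinv : p ∣ 2*inv2 - 1)
    (hu : p ∣ s1 - luU X Y m) (hv : p ∣ s2 - luV X Y m) :
    lucasStep X delta inv2 p (s1, s2) c =
      (PySem.Int.mod (luU X Y (if c = '1' then m+m+1 else m+m)) p,
       PySem.Int.mod (luV X Y (if c = '1' then m+m+1 else m+m)) p) := by
  have hp : p ≠ 0 := ne_zero_of_not_two_dvd hp2
  have hA := (Ladd X Y m m).1
  have hB := (Ladd X Y m m).2
  have hU : PySem.Int.mod (s1 * s2) p = PySem.Int.mod (luU X Y (m+m)) p := by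
    apply mod_congr hp
    apply odd_cancel hp2
    have e : 2*(s1*s2 - luU X Y (m+m))
        = (2*s1)*(s2 - luV X Y m) + (2*luV X Y m)*(s1 - luU X Y m) := by
      linear_combination -hA
    rw [e]
    exact dvd_add (hv.mul_left _) (hu.mul_left _)
  have hV : PySem.Int.mod ((s2*s2 + delta*s1*s1) * inv2) p = PySem.Int.mod (luV X Y (m+m)) p := by
    apply mod_congr hp
    apply odd_cancel hp2
    have e : 2*((s2*s2 + delta*s1*s1)*inv2 - luV X Y (m+m))
        = (s2*s2 + delta*s1*s1)*(2*inv2 - 1)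
          + (s2 + luV X Y m)*(s2 - luV X Y m)
          + delta*((s1 + luU X Y m)*(s1 - luU X Y m))
          + (luU X Y m * luU X Y m)*(delta - (X*X - 4*Y)) := by
      linear_combination -hB
    rw [e]
    exact dvd_add (dvd_add (dvd_add (hinv.mul_left _) (hv.mul_left _))
      ((hu.mul_left (s1 + luU X Y m)).mul_left delta)) (hdelta.mul_left _)
  have hU' : p ∣ PySem.Int.mod (s1 * s2) p - luU X Y (m+m) := by
    rw [hU]
    exact (dvd_sub_comm).mp (dvd_sub_mod (luU X Y (m+m)) p)
  have hV' : p ∣ PySem.Int.mod ((s2*s2 + delta*s1*s1) * inv2) p - luV X Y (m+m) := by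
    rw [hV]
    exact (dvd_sub_comm).mp (dvd_sub_mod (luV X Y (m+m)) p)
  have hL1 := (L12 X Y (m+m)).1
  have hL2 := (L12 X Y (m+m)).2
  by_cases hc : c = '1'
  · simp only [lucasStep, hc, if_pos, Prod.mk.injEq]
    constructor
    · apply mod_congr hp
      apply odd_cancel hp2
      have e : 2*((X * PySem.Int.mod (s1*s2) p + PySem.Int.mod ((s2*s2 + delta*s1*s1)*inv2) p) * inv2 - luU X Y (m+m+1))
          = (X * PySem.Int.mod (s1*s2) p + PySem.Int.mod ((s2*s2+delta*s1*s1)*inv2) p)*(2*inv2 - 1)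
            + X*(PySem.Int.mod (s1*s2) p - luU X Y (m+m))
            + (PySem.Int.mod ((s2*s2+delta*s1*s1)*inv2) p - luV X Y (m+m)) := by
        linear_combination -hL1
      rw [e]
      exact dvd_add (dvd_add (hinv.mul_left _) (hU'.mul_left _)) hV'
    · apply mod_congr hp
      apply odd_cancel hp2
      have e : 2*((X * PySem.Int.mod ((s2*s2 + delta*s1*s1)*inv2) p + delta * PySem.Int.mod (s1*s2) p) * inv2 - luV X Y (m+m+1))
          = (X * PySem.Int.mod ((s2*s2+delta*s1*s1)*inv2) p + delta * PySem.Int.mod (s1*s2) p)*(2*inv2 - 1)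
            + X*(PySem.Int.mod ((s2*s2+delta*s1*s1)*inv2) p - luV X Y (m+m))
            + delta*(PySem.Int.mod (s1*s2) p - luU X Y (m+m))
            + luU X Y (m+m)*(delta - (X*X - 4*Y)) := by
        linear_combination -hL2
      rw [e]
      exact dvd_add (dvd_add (dvd_add (hinv.mul_left _) (hV'.mul_left _)) (hU'.mul_left _)) (hdelta.mul_left _)
  · simp only [lucasStep, if_neg hc]
    exact Prod.ext hU hV

-- the binary digits of n, most significant first (value of Nat.toDigits 2)
def bitsAux (n : Nat) : List Char :=
  if n < 2 then [Nat.digitChar n]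
  else bitsAux (n / 2) ++ [Nat.digitChar (n % 2)]
termination_by n
decreasing_by omega

lemma toDigitsCore_eq_bitsAux : ∀ f n ds, 0 < f → n < 2 ^ f →
    Nat.toDigitsCore 2 f n ds = bitsAux n ++ ds := by
  intro f
  induction f with
  | zero => omega
  | succ f ih =>
    intro n ds hfpos hn
    rw [Nat.toDigitsCore]
    by_cases h2 : n / 2 = 0
    · simp only [h2, if_pos rfl]
      have hn2 : n % 2 = n := by omega
      rw [hn2, bitsAux, if_pos (show n < 2 by omega)]
      rfl
    · rw [if_neg h2]
      rw [pow_succ] at hn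
      have hf : 0 < f := by
        rcases Nat.eq_zero_or_pos f with h | h
        · subst h; omega
        · exact h
      have hb : bitsAux n = bitsAux (n / 2) ++ [Nat.digitChar (n % 2)] := by
        rw [bitsAux]
        rw [if_neg (by omega)]
      rw [ih (n/2) _ hf (by omega), hb]
      simp

-- the ladder over the binary digits of n, started from any state ≡ (U_0, V_0)
lemma fold_bits (X Y delta inv2 p : Int)
    (hp2 : ¬(2:Int) ∣ p) (hdelta : p ∣ delta - (X*X - 4*Y)) (hinv : p ∣ 2*inv2 - 1) :
    ∀ n : Nat, ∀ s : Int × Int, p ∣ s.1 - luU X Y 0 → p ∣ s.2 - luV X Y 0 →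
    (bitsAux n).foldl (lucasStep X delta inv2 p) s =
      (PySem.Int.mod (luU X Y n) p, PySem.Int.mod (luV X Y n) p) := by
  intro n
  induction n using Nat.strong_induction_on with
  | _ n ih =>
    intro s hu hv
    by_cases h : n < 2
    · rw [bitsAux, if_pos h]
      have hs := lucas_step_spec X Y delta inv2 p 0 s.1 s.2 (Nat.digitChar n) hp2 hdelta hinv hu hv
      interval_cases n
      · simpa using hs
      · simpa using hs
    · rw [bitsAux, if_neg h, List.foldl_append]
      rw [ih (n/2) (by omega) s hu hv]
      have hu' : p ∣ PySem.Int.mod (luU X Y (n/2)) p - luU X Y (n/2) :=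
        (dvd_sub_comm).mp (dvd_sub_mod _ p)
      have hv' : p ∣ PySem.Int.mod (luV X Y (n/2)) p - luV X Y (n/2) :=
        (dvd_sub_comm).mp (dvd_sub_mod _ p)
      have hs := lucas_step_spec X Y delta inv2 p (n/2) _ _ (Nat.digitChar (n % 2)) hp2 hdelta hinv hu' hv'
      rcases Nat.mod_two_eq_zero_or_one n with h2 | h2
      · rw [h2] at hs
        simp only [List.foldl_cons, List.foldl_nil, h2]
        rw [hs]
        have hn : n/2 + n/2 = n := by omega
        simp [hn, Nat.digitChar]
      · rw [h2] at hs
        simp only [List.foldl_cons, List.foldl_nil, h2]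
        rw [hs]
        have hn : n/2 + n/2 + 1 = n := by omega
        simp [hn, Nat.digitChar]

-- _inv(2, p) really is an inverse of 2 for odd p (the loop runs exactly two rounds)
lemma inv2_spec (p : Int) (hp2 : ¬(2:Int) ∣ p) : p ∣ 2 * inv_py 2 p - 1 := by
  have hm : PySem.Int.mod p 2 = 1 := by
    rcases PySem.Int.mod_two_eq p with h | h
    · exact absurd ((PySem.Int.mod_eq_zero_iff_dvd p 2).mp h) hp2
    · exact h
  have e : invLoop p 2 0 1 = 0 - PySem.Int.floordiv p 2 * 1 := by
    rw [invLoop, dif_pos (by norm_num : (0:Int) < 2)]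
    simp only [hm]
    rw [invLoop, dif_pos (by norm_num : (0:Int) < 1)]
    simp only [show PySem.Int.mod 2 1 = 0 by decide]
    rw [invLoop, dif_neg (by norm_num : ¬ (0:Int) < 0)]
  have hfm := PySem.Int.floordiv_mul_add_mod p 2
  rw [inv_py, e]
  have e2 : 2 * PySem.Int.mod (0 - PySem.Int.floordiv p 2 * 1) p - 1
      = 2 * (PySem.Int.mod (0 - PySem.Int.floordiv p 2 * 1) p - (0 - PySem.Int.floordiv p 2 * 1)) + (-p) := by
    linear_combination -hfm + hm
  rw [e2]
  exact dvd_add (((dvd_sub_comm).mp (dvd_sub_mod _ p)).mul_left 2) (Dvd.intro (-1) (by ring))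

lemma toDigits_eq_bitsAux (m : Nat) : Nat.toDigits 2 m = bitsAux m := by
  rw [Nat.toDigits, toDigitsCore_eq_bitsAux (m+1) m [] (by omega)
    (lt_of_lt_of_le Nat.lt_two_pow_self (Nat.pow_le_pow_right (by norm_num) (by omega))),
    List.append_nil]

-- A computes (U_{|k|} mod p, V_{|k|} mod p)
lemma A_eq (X Y k p : Int) (hp2 : ¬(2:Int) ∣ p) :
    generate_lucas_py X Y k p =
      (PySem.Int.mod (luU X Y k.natAbs) p, PySem.Int.mod (luV X Y k.natAbs) p) := by
  have hdelta : p ∣ PySem.Int.mod (X*X - 4*Y) p - (X*X - 4*Y) :=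
    (dvd_sub_comm).mp (dvd_sub_mod _ p)
  have hinv := inv2_spec p hp2
  rw [generate_lucas_py]
  rw [PySem.Int.toBinChars]
  by_cases hk : k < 0
  · rw [if_pos hk]
    rw [toDigits_eq_bitsAux]
    rw [List.foldl_cons]
    have hstep := lucas_step_spec X Y (PySem.Int.mod (X*X - 4*Y) p) (inv_py 2 p) p 0
      (0:Int) (2:Int) '-' hp2 hdelta hinv (by rw [luU_zero]; simp) (by rw [luV_zero]; simp)
    simp only [show ¬('-' = '1') by decide, if_neg] at hstep
    rw [hstep]
    exact fold_bits X Y _ _ p hp2 hdelta hinv k.natAbs _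
      ((dvd_sub_comm).mp (dvd_sub_mod _ p)) ((dvd_sub_comm).mp (dvd_sub_mod _ p))
  · rw [if_neg hk]
    rw [toDigits_eq_bitsAux]
    have : k.toNat = k.natAbs := by omega
    rw [this]
    exact fold_bits X Y _ _ p hp2 hdelta hinv k.natAbs (0, 2)
      (by rw [luU_zero]; simp) (by rw [luV_zero]; simp)

-- second-column sequence of the companion-matrix powers: 1, 0, then the Lucas recurrence
def cseq (X Y : Int) : Nat → Int
  | 0 => 1
  | 1 => 0
  | n + 2 => X * cseq X Y (n + 1) - Y * cseq X Y n

lemma cseq_succ (X Y : Int) : ∀ n, cseq X Y (n+1) = -Y * luU X Y n := by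
  intro n
  induction n using Nat.twoStepInduction with
  | zero => rw [luU_zero]; simp [cseq]
  | one => rw [luU_one]; simp [cseq]
  | more n ih1 ih2 =>
    rw [show n+1+1 = n+2 from rfl] at ih2
    rw [show n+2+1 = (n+1)+2 from rfl]
    rw [show cseq X Y ((n+1)+2) = X * cseq X Y (n+2) - Y * cseq X Y (n+1) from rfl]
    rw [ih1, ih2, luU_rec]
    ring

-- exact (un-reduced) companion-matrix power over ℤ
def Nmul (A B : (Int × Int) × (Int × Int)) : (Int × Int) × (Int × Int) :=
  ((A.1.1 * B.1.1 + A.1.2 * B.2.1, A.1.1 * B.1.2 + A.1.2 * B.2.2),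
   (A.2.1 * B.1.1 + A.2.2 * B.2.1, A.2.1 * B.1.2 + A.2.2 * B.2.2))

def Npow (X Y : Int) : Nat → (Int × Int) × (Int × Int)
  | 0 => ((1, 0), (0, 1))
  | n + 1 => Nmul (Npow X Y n) ((X, -Y), (1, 0))

lemma Npow_entries (X Y : Int) : ∀ n, Npow X Y n
    = ((luU X Y (n+1), cseq X Y (n+1)), (luU X Y n, cseq X Y n)) := by
  intro n
  induction n with
  | zero => rw [luU_zero, luU_one]; simp [Npow, cseq]
  | succ n ih =>
    rw [show Npow X Y (n+1) = Nmul (Npow X Y n) ((X, -Y), (1, 0)) from rfl, ih]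
    have h1 := cseq_succ X Y n
    have h2 := cseq_succ X Y (n+1)
    simp only [Nmul, Prod.mk.injEq]
    refine ⟨⟨?_, ?_⟩, ?_, ?_⟩
    · rw [show n+1+1 = n+2 from rfl, luU_rec, h1]; ring
    · rw [h2]; ring
    · cases n with
      | zero => rw [luU_zero, luU_one]; simp [cseq]
      | succ m => rw [cseq_succ X Y m, show m+1+1 = m+2 from rfl, luU_rec]; ring
    · rw [h1]; ring

lemma Nmul_id_right (A : (Int × Int) × (Int × Int)) : Nmul A ((1, 0), (0, 1)) = A := by
  obtain ⟨⟨a11, a12⟩, a21, a22⟩ := A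
  simp only [Nmul, Prod.mk.injEq]
  refine ⟨⟨by ring, by ring⟩, by ring, by ring⟩

lemma Nmul_assoc (A B C : (Int × Int) × (Int × Int)) :
    Nmul (Nmul A B) C = Nmul A (Nmul B C) := by
  obtain ⟨⟨a11, a12⟩, a21, a22⟩ := A
  obtain ⟨⟨b11, b12⟩, b21, b22⟩ := B
  obtain ⟨⟨c11, c12⟩, c21, c22⟩ := C
  simp only [Nmul, Prod.mk.injEq]
  refine ⟨⟨by ring, by ring⟩, by ring, by ring⟩

lemma Npow_add (X Y : Int) (a : Nat) : ∀ b, Npow X Y (a + b) = Nmul (Npow X Y a) (Npow X Y b) := by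
  intro b
  induction b with
  | zero => rw [Nat.add_zero, show Npow X Y 0 = ((1,0),(0,1)) from rfl, Nmul_id_right]
  | succ b ih =>
    rw [show a + (b+1) = (a+b)+1 from rfl,
        show Npow X Y ((a+b)+1) = Nmul (Npow X Y (a+b)) ((X, -Y), (1, 0)) from rfl, ih,
        Nmul_assoc,
        show Nmul (Npow X Y b) ((X, -Y), (1, 0)) = Npow X Y (b+1) from rfl]

-- entrywise reduction mod p
def mmod (p : Int) (A : (Int × Int) × (Int × Int)) : (Int × Int) × (Int × Int) :=
  ((PySem.Int.mod A.1.1 p, PySem.Int.mod A.1.2 p),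
   (PySem.Int.mod A.2.1 p, PySem.Int.mod A.2.2 p))

lemma dvd_mod_mul_pair {p : Int} (a e b g : Int) :
    p ∣ (PySem.Int.mod a p * PySem.Int.mod e p + PySem.Int.mod b p * PySem.Int.mod g p) - (a*e + b*g) := by
  have h : (PySem.Int.mod a p * PySem.Int.mod e p + PySem.Int.mod b p * PySem.Int.mod g p) - (a*e + b*g)
      = PySem.Int.mod a p * (PySem.Int.mod e p - e) + e * (PySem.Int.mod a p - a)
        + (PySem.Int.mod b p * (PySem.Int.mod g p - g) + g * (PySem.Int.mod b p - b)) := by ring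
  rw [h]
  exact dvd_add
    (dvd_add ((((dvd_sub_comm).mp (dvd_sub_mod _ p))).mul_left _) ((((dvd_sub_comm).mp (dvd_sub_mod _ p))).mul_left _))
    (dvd_add ((((dvd_sub_comm).mp (dvd_sub_mod _ p))).mul_left _) ((((dvd_sub_comm).mp (dvd_sub_mod _ p))).mul_left _))

lemma matMul_mmod {p : Int} (hp : p ≠ 0) (A B : (Int × Int) × (Int × Int)) :
    matMul p (mmod p A) (mmod p B) = mmod p (Nmul A B) := by
  simp only [matMul, mmod, Nmul, Prod.mk.injEq]
  exact ⟨⟨mod_congr hp (dvd_mod_mul_pair _ _ _ _), mod_congr hp (dvd_mod_mul_pair _ _ _ _)⟩,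
         mod_congr hp (dvd_mod_mul_pair _ _ _ _), mod_congr hp (dvd_mod_mul_pair _ _ _ _)⟩

lemma mod_zero_eq (p : Int) : PySem.Int.mod 0 p = 0 := by
  simp [PySem.Int.mod, Int.zero_fmod]

lemma matPow_eq (X Y p : Int) (hp : p ≠ 0) : ∀ m, matPow X Y p m = mmod p (Npow X Y m) := by
  intro m
  induction m using Nat.strong_induction_on with
  | _ m ih =>
    by_cases h0 : m = 0
    · subst h0
      rw [matPow, if_pos rfl]
      simp [mmod, Npow, mod_zero_eq]
    · rw [matPow, if_neg h0]
      have hh := ih (m / 2) (by omega)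
      rcases Nat.mod_two_eq_zero_or_one m with h2 | h2
      · rw [h2, if_neg (by norm_num : ¬ (0:Nat) = 1)]
        rw [hh, matMul_mmod hp, ← Npow_add X Y (m/2) (m/2),
            show m/2 + m/2 = m by omega]
      · rw [h2, if_pos rfl]
        rw [hh, matMul_mmod hp]
        have hb : ((PySem.Int.mod X p, PySem.Int.mod (-Y) p), (PySem.Int.mod 1 p, 0))
            = mmod p ((X, -Y), (1, 0)) := by
          simp [mmod, mod_zero_eq]
        rw [hb, matMul_mmod hp, ← Npow_add X Y (m/2) (m/2)]
        have h1 : Nmul (Npow X Y (m/2 + m/2)) ((X, -Y), (1, 0)) = Npow X Y (m/2 + m/2 + 1) := rfl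
        rw [h1, show m/2 + m/2 + 1 = m by omega]

-- B computes (U_{|k|} mod p, V_{|k|} mod p)
lemma B_eq (X Y k p : Int) (hp : p ≠ 0) :
    generate_lucas_py_alt X Y k p =
      (PySem.Int.mod (luU X Y k.natAbs) p, PySem.Int.mod (luV X Y k.natAbs) p) := by
  rw [generate_lucas_py_alt]
  rw [matPow_eq X Y p hp k.natAbs, Npow_entries]
  simp only [mmod, Prod.mk.injEq]
  constructor
  · exact mod_congr hp ((dvd_sub_comm).mp (dvd_sub_mod _ p))
  · apply mod_congr hp
    have hL := (L12 X Y k.natAbs).1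
    have e : 2 * PySem.Int.mod (luU X Y (k.natAbs + 1)) p - X * PySem.Int.mod (luU X Y k.natAbs) p
        - luV X Y k.natAbs
        = 2 * (PySem.Int.mod (luU X Y (k.natAbs + 1)) p - luU X Y (k.natAbs + 1))
          - X * (PySem.Int.mod (luU X Y k.natAbs) p - luU X Y k.natAbs) := by
      linear_combination hL
    rw [e]
    exact dvd_sub (((dvd_sub_comm).mp (dvd_sub_mod _ p)).mul_left 2)
      (((dvd_sub_comm).mp (dvd_sub_mod _ p)).mul_left X)

-- ===== VERDICT (by name: the statement is the Claim_ definition above) =====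
theorem generate_lucas_py_spec : Claim_equal_generate_lucas_py := by
  intro X Y k p _ hpre
  have hp2 : ¬ (2:Int) ∣ p := hpre
  unfold Spec_generate_lucas_py
  rw [A_eq X Y k p hp2, B_eq X Y k p (ne_zero_of_not_two_dvd hp2)]
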